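-- pv_equiv track=rewrite | github.com/Isla-lab/fv-mcts-spibb | agents/var_el.py | compute_best_order
-- ===== SOURCE A (Python) =====
-- def compute_best_order(indices, max):
--     order = []
--     remaining = list(range(max))
--     new_indices = [i for i in indices]
--     while len(remaining) >= 1:
--         min = float("inf")
--         argmin = -1
--         touched = []
--         for i in remaining:
--             c = 0
--             ti = []
--             t = []
--             for j, i_ in enumerate(new_indices):
--                 if i in i_:
--                     c += 1
--                     ti.append(j)
--                     t.append(i_)
--             if c < min:
--                 min = c
--                 argmin = i
--                 touched = t
--         # Change data given we have chosen i
--         order.append(argmin)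
--         remaining.remove(argmin)
--         # New indices
--         new_i = []
--         for t in touched:
--             for k in t:
--                 if k not in new_i:
--                     new_i.append(k)
--             new_indices.remove(t)
--         new_indices.append(new_i)
--     return order
-- ===== SOURCE B (Python) =====
-- def compute_best_order(indices, max):
--     # Alternative data structure: a partition of FACTOR INDICES (explicit
--     # union-find components) plus a static var -> factor-index map; variable
--     # lists are never merged, deduped or rescanned.
--     varfac = {}
--     for j, f in enumerate(indices):
--         for v in f:
--             varfac.setdefault(v, set()).add(j)
--     empty = frozenset()
--     groups = [frozenset([j]) for j in range(len(indices))]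
--     order = []
--     remaining = list(range(max))
--     while remaining:
--         best = None
--         best_c = None
--         for v in remaining:
--             vf = varfac.get(v, empty)
--             c = sum(1 for g in groups if not vf.isdisjoint(g))
--             if best is None or c < best_c:
--                 best, best_c = v, c
--         order.append(best)
--         remaining.remove(best)
--         bf = varfac.get(best, empty)
--         merged = empty
--         kept = []
--         for g in groups:
--             if not bf.isdisjoint(g):
--                 merged = merged | g
--             else:
--                 kept.append(g)
--         kept.append(merged)
--         groups = kept
--     return order
-- ===== Notes on version B (the rewrite author's own statement) =====
-- stated objective: alternative
-- what changed: B never merges or rescans variable lists: it freezes each factor's variables into a set once, builds a static var->factor-index map, and tracks only a partition of factor indices (explicit union-find components), selecting the min-count variable by set-disjointness tests and merging by index-set union instead of A's per-variable rescans of growing merged lists and quadratic 'k not in new_i' dedup merges.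
import Mathlib
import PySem

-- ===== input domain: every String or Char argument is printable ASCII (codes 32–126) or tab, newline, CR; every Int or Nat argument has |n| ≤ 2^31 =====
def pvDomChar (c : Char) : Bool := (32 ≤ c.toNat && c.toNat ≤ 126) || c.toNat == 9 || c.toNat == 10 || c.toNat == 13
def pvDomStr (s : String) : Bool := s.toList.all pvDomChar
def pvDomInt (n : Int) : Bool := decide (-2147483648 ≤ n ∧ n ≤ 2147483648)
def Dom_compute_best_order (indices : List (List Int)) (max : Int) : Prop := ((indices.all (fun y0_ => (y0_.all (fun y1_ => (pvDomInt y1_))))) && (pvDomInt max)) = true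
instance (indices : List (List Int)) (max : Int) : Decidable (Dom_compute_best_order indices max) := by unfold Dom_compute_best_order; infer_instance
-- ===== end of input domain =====

-- B replaces A's merged variable lists by a partition of FACTOR INDICES (explicit
-- union-find components) plus a static var -> factor-index map; same return value,
-- objective: alternative (no growing-list rescans or dedup merges).

-- ===== PORT A =====
-- inner 'for j, i_ in enumerate(new_indices)' loop of A, state (c, ti, t)
def pvInnerA (i : Int) (nids : List (List Int)) : Int × List Int × List (List Int) :=
  (PySem.List.enumerate nids).foldl
    (fun s ji => if i ∈ ji.2 then (s.1 + 1, s.2.1 ++ [ji.1], s.2.2 ++ [ji.2]) else s)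
    (0, [], [])

-- 'for i in remaining' loop of A, state (min, argmin, touched); min = none models float('inf')
def pvSelectA (remaining : List Int) (nids : List (List Int)) : Option Int × Int × List (List Int) :=
  remaining.foldl
    (fun s i =>
      let r := pvInnerA i nids
      if (match s.1 with | none => true | some m => decide (r.1 < m)) then
        (some r.1, i, r.2.2)
      else s)
    (none, -1, [])

-- one iteration of A's while loop: (appended var, new remaining, new new_indices)
-- '.getD' on remove? is unreachable: argmin is always a member (Python's .remove never raises here)
def pvStepA (remaining : List Int) (nids : List (List Int)) : Int × List Int × List (List Int) :=
  let s := pvSelectA remaining nids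
  let argmin := s.2.1
  let touched := s.2.2
  let rem' := (PySem.List.remove? remaining argmin).getD remaining
  let m := touched.foldl
    (fun (st : List Int × List (List Int)) t =>
      (t.foldl (fun ni k => if k ∈ ni then ni else ni ++ [k]) st.1,
       (PySem.List.remove? st.2 t).getD st.2))
    ([], nids)
  (argmin, rem', m.2 ++ [m.1])

-- A's while loop; fuel = |remaining| (each iteration removes exactly one element)
def pvLoopA : Nat → List Int → List (List Int) → List Int → List Int
  | 0, _, _, order => order
  | fuel+1, remaining, nids, order =>
    if remaining.isEmpty then order
    else
      let st := pvStepA remaining nids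
      pvLoopA fuel st.2.1 st.2.2 (order ++ [st.1])

def compute_best_order (indices : List (List Int)) (max : Int) : List Int :=
  let remaining := PySem.List.pyRange 0 max 1
  pvLoopA remaining.length remaining (indices.map (fun i => i)) []

-- ===== PORT B =====
-- 'for j, f in enumerate(indices): for v in f: varfac.setdefault(v, set()).add(j)'
def pvVarfac (indices : List (List Int)) : PySem.Dict Int (PySem.Set Int) :=
  (PySem.List.enumerate indices).foldl
    (fun d jf => jf.2.foldl (fun d v => d.insert v ((d.getD v PySem.Set.empty).add jf.1)) d)
    PySem.Dict.empty

-- 'c = sum(1 for g in groups if not vf.isdisjoint(g))' for vf = varfac.get(v, empty)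
def pvCntB (vfac : PySem.Dict Int (PySem.Set Int)) (groups : List (PySem.Set Int)) (v : Int) : Int :=
  let vf := vfac.getD v PySem.Set.empty
  groups.foldl (fun c g => if !(PySem.Set.isdisjoint vf g) then c + 1 else c) 0

-- 'for v in remaining' selection loop of B, state (best, best_c); None modelled by Option
def pvSelB (vfac : PySem.Dict Int (PySem.Set Int)) (groups : List (PySem.Set Int))
    (remaining : List Int) : Option (Int × Int) :=
  remaining.foldl
    (fun s v =>
      let c := pvCntB vfac groups v
      match s with
      | none => some (v, c)
      | some bc => if c < bc.2 then some (v, c) else some bc)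
    none

-- B's while loop; '.getD (-1, 0)' is unreachable: remaining ≠ [] gives some best
def pvLoopB (vfac : PySem.Dict Int (PySem.Set Int)) :
    Nat → List Int → List (PySem.Set Int) → List Int → List Int
  | 0, _, _, order => order
  | fuel+1, remaining, groups, order =>
    if remaining.isEmpty then order
    else
      let best := ((pvSelB vfac groups remaining).getD (-1, 0)).1
      let rem' := (PySem.List.remove? remaining best).getD remaining
      let bf := vfac.getD best PySem.Set.empty
      let st := groups.foldl
        (fun (st : PySem.Set Int × List (PySem.Set Int)) g =>
          if !(PySem.Set.isdisjoint bf g) then (PySem.Set.union st.1 g, st.2)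
          else (st.1, st.2 ++ [g]))
        (PySem.Set.empty, [])
      pvLoopB vfac fuel rem' (st.2 ++ [st.1]) (order ++ [best])

def compute_best_order_alt (indices : List (List Int)) (max : Int) : List Int :=
  let vfac := pvVarfac indices
  let groups := (PySem.List.pyRange 0 (PySem.List.len indices) 1).map (fun j => PySem.Set.ofList [j])
  let remaining := PySem.List.pyRange 0 max 1
  pvLoopB vfac remaining.length remaining groups []

-- ===== PRECONDITION & SPEC =====
def Spec_compute_best_order (indices : List (List Int)) (max : Int) (out : List Int) : Prop := out = compute_best_order_alt indices max
instance (indices : List (List Int)) (max : Int) (out : List Int) : Decidable (Spec_compute_best_order indices max out) := by unfold Spec_compute_best_order; infer_instance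

-- ===== CLAIM (what is proved, stated in full; the proofs are below) =====
def Claim_equal_compute_best_order : Prop := ∀ (indices : List (List Int)) (max : Int), Dom_compute_best_order indices max → Spec_compute_best_order indices max (compute_best_order indices max)

-- ===== LEMMAS AND PROOFS =====

-- 'v touches group g': v's factor-index set meets g
def pvTch (vfac : PySem.Dict Int (PySem.Set Int)) (g : PySem.Set Int) (v : Int) : Bool :=
  !(PySem.Set.isdisjoint (vfac.getD v PySem.Set.empty) g)

-- the loop invariant: i-th factor of A and i-th group of B have the same members
def pvRel (vfac : PySem.Dict Int (PySem.Set Int)) (f : List Int) (g : PySem.Set Int) : Prop :=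
  ∀ v : Int, v ∈ f ↔ pvTch vfac g v = true

-- ---- A-side characterisations (count / touched / selection) ----
theorem pv_inner_fst (i : Int) (l : List (Int × List Int)) (s : Int × List Int × List (List Int)) :
    (l.foldl (fun s ji => if i ∈ ji.2 then (s.1 + 1, s.2.1 ++ [ji.1], s.2.2 ++ [ji.2]) else s) s).1
      = s.1 + (l.countP (fun ji => decide (i ∈ ji.2)) : Int) := by
  induction l generalizing s with
  | nil => simp
  | cons x l ih =>
    simp only [List.foldl_cons, List.countP_cons]
    by_cases h : i ∈ x.2 <;> (simp [h, ih]; try ring)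

theorem pv_inner_t (i : Int) (l : List (Int × List Int)) (s : Int × List Int × List (List Int)) :
    (l.foldl (fun s ji => if i ∈ ji.2 then (s.1 + 1, s.2.1 ++ [ji.1], s.2.2 ++ [ji.2]) else s) s).2.2
      = s.2.2 ++ (l.filter (fun ji => decide (i ∈ ji.2))).map (·.2) := by
  induction l generalizing s with
  | nil => simp
  | cons x l ih =>
    simp only [List.foldl_cons, List.filter_cons]
    by_cases h : i ∈ x.2 <;> simp [h, ih]

theorem pv_enum_countP (i : Int) (n : List (List Int)) (st : Int) :
    (PySem.List.enumerate n st).countP (fun ji => decide (i ∈ ji.2))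
      = n.countP (fun f => decide (i ∈ f)) := by
  induction n generalizing st with
  | nil => simp [PySem.List.enumerate]
  | cons f n ih => simp [PySem.List.enumerate, List.countP_cons, ih]

theorem pv_enum_filter_map (i : Int) (n : List (List Int)) (st : Int) :
    ((PySem.List.enumerate n st).filter (fun ji => decide (i ∈ ji.2))).map (·.2)
      = n.filter (fun f => decide (i ∈ f)) := by
  induction n generalizing st with
  | nil => simp [PySem.List.enumerate]
  | cons f n ih =>
    simp only [PySem.List.enumerate, List.filter_cons]
    by_cases h : i ∈ f <;> simp [h, ih]

theorem pvInnerA_fst (i : Int) (n : List (List Int)) :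
    (pvInnerA i n).1 = (n.countP (fun f => decide (i ∈ f)) : Int) := by
  unfold pvInnerA
  rw [pv_inner_fst, pv_enum_countP]
  simp

theorem pvInnerA_t (i : Int) (n : List (List Int)) :
    (pvInnerA i n).2.2 = n.filter (fun f => decide (i ∈ f)) := by
  unfold pvInnerA
  rw [pv_inner_t, pv_enum_filter_map]
  simp

-- interpretation of the min?-accumulator as A's (min, argmin, touched) state
def pvH (n : List (List Int)) : Option Int → Option Int × Int × List (List Int)
  | none => (none, -1, [])
  | some m => (some (pvInnerA m n).1, m, (pvInnerA m n).2.2)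

theorem pv_select_gen (n : List (List Int)) (l : List Int) (o : Option Int) :
    l.foldl
      (fun s i =>
        let r := pvInnerA i n
        if (match s.1 with | none => true | some m => decide (r.1 < m)) then
          (some r.1, i, r.2.2)
        else s)
      (pvH n o)
    = pvH n (l.foldl
        (fun acc x => match acc with
          | none => some x
          | some m => if (pvInnerA x n).1 < (pvInnerA m n).1 then some x else some m)
        o) := by
  induction l generalizing o with
  | nil => rfl
  | cons x l ih =>
    simp only [List.foldl_cons]
    rw [← ih]
    congr 1
    cases o with
    | none => rfl
    | some m =>
      simp only [pvH]
      by_cases h : (pvInnerA x n).1 < (pvInnerA m n).1 <;> simp [h]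

theorem pv_select_spec (r : List Int) (n : List (List Int)) :
    pvSelectA r n = pvH n (PySem.List.min? r (fun v => (pvInnerA v n).1)) := by
  unfold pvSelectA
  have h0 : (none, -1, ([] : List (List Int))) = pvH n none := rfl
  rw [h0, pv_select_gen]
  unfold PySem.List.min?
  congr 1
  congr 1
  funext acc x
  cases acc <;> rfl

-- ---- A-side: 'new_indices.remove(t) for t in touched' = filter out the touched ----
theorem pv_remove_cons_ne (t f : List Int) (l : List (List Int)) (h : t ≠ f) :
    (PySem.List.remove? (f :: l) t).getD (f :: l) = f :: (PySem.List.remove? l t).getD l := by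
  simp only [PySem.List.remove?, List.idxOf?_cons, beq_iff_eq, Ne.symm h, if_false]
  cases hi : l.idxOf? t <;> simp [List.eraseIdx_cons_succ]

theorem pv_remove_cons_self (f : List Int) (l : List (List Int)) :
    (PySem.List.remove? (f :: l) f).getD (f :: l) = l := by
  simp [PySem.List.remove?, List.idxOf?_cons]

theorem pv_fold_remove_cons (ts : List (List Int)) (f : List Int) (l : List (List Int))
    (h : ∀ t ∈ ts, t ≠ f) :
    ts.foldl (fun l t => (PySem.List.remove? l t).getD l) (f :: l)
      = f :: ts.foldl (fun l t => (PySem.List.remove? l t).getD l) l := by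
  induction ts generalizing l with
  | nil => simp
  | cons t ts ih =>
    simp only [List.foldl_cons]
    rw [pv_remove_cons_ne t f l (h t (by simp))]
    exact ih _ (fun x hx => h x (by simp [hx]))

theorem pv_remove_filter (p : List Int → Prop) [DecidablePred p] (n : List (List Int)) :
    (n.filter (fun f => decide (p f))).foldl (fun l t => (PySem.List.remove? l t).getD l) n
      = n.filter (fun f => decide (¬ p f)) := by
  induction n with
  | nil => simp
  | cons f n ih =>
    by_cases h : p f
    · simp only [List.filter_cons, h, decide_true, if_true, decide_not, List.foldl_cons,
        Bool.not_true, Bool.false_eq_true]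
      rw [pv_remove_cons_self]
      simpa [h] using ih
    · simp only [List.filter_cons, h, decide_false, decide_not, Bool.not_false]
      rw [pv_fold_remove_cons _ f n
        (fun t ht => fun he => h (he ▸ (by simpa using List.of_mem_filter ht)))]
      simpa [h] using ih

-- ---- B-side characterisations ----
theorem pvCntB_eq_countP (vfac : PySem.Dict Int (PySem.Set Int)) (groups : List (PySem.Set Int)) (v : Int) :
    pvCntB vfac groups v = (groups.countP (fun g => pvTch vfac g v) : Int) := by
  unfold pvCntB
  have := PySem.List.foldl_if_add_one (fun g => pvTch vfac g v) groups 0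
  simpa [pvTch] using this

-- B's selection fold as min? with key pvCntB
def pvHB (vfac : PySem.Dict Int (PySem.Set Int)) (groups : List (PySem.Set Int)) :
    Option Int → Option (Int × Int)
  | none => none
  | some m => some (m, pvCntB vfac groups m)

theorem pv_selB_gen (vfac : PySem.Dict Int (PySem.Set Int)) (groups : List (PySem.Set Int))
    (l : List Int) (o : Option Int) :
    l.foldl
      (fun s v =>
        let c := pvCntB vfac groups v
        match s with
        | none => some (v, c)
        | some bc => if c < bc.2 then some (v, c) else some bc)
      (pvHB vfac groups o)
    = pvHB vfac groups (l.foldl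
        (fun acc x => match acc with
          | none => some x
          | some m => if pvCntB vfac groups x < pvCntB vfac groups m then some x else some m)
        o) := by
  induction l generalizing o with
  | nil => rfl
  | cons x l ih =>
    simp only [List.foldl_cons]
    rw [← ih]
    congr 1
    cases o with
    | none => rfl
    | some m =>
      simp only [pvHB]
      by_cases h : pvCntB vfac groups x < pvCntB vfac groups m <;> simp [h]

theorem pv_selB_spec (vfac : PySem.Dict Int (PySem.Set Int)) (groups : List (PySem.Set Int))
    (r : List Int) :
    pvSelB vfac groups r = pvHB vfac groups (PySem.List.min? r (pvCntB vfac groups)) := by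
  unfold pvSelB
  have h0 : (none : Option (Int × Int)) = pvHB vfac groups none := rfl
  rw [h0, pv_selB_gen]
  unfold PySem.List.min?
  congr 1
  congr 1
  funext acc x
  cases acc <;> rfl

-- B's merge loop splits into union-over-touching and keep-the-rest
theorem pv_mergeB_split (bf : PySem.Set Int) (groups : List (PySem.Set Int))
    (a : PySem.Set Int) (b : List (PySem.Set Int)) :
    groups.foldl
      (fun (st : PySem.Set Int × List (PySem.Set Int)) g =>
        if !(PySem.Set.isdisjoint bf g) then (PySem.Set.union st.1 g, st.2)
        else (st.1, st.2 ++ [g]))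
      (a, b)
    = ((groups.filter (fun g => !(PySem.Set.isdisjoint bf g))).foldl PySem.Set.union a,
       b ++ groups.filter (fun g => PySem.Set.isdisjoint bf g)) := by
  induction groups generalizing a b with
  | nil => simp
  | cons g groups ih =>
    simp only [List.foldl_cons, List.filter_cons]
    cases h : PySem.Set.isdisjoint bf g with
    | false =>
      rw [if_pos (by decide), ih]
      simp
    | true =>
      rw [if_neg (by decide), ih]
      simp

-- ---- invariant transfer lemmas ----
theorem pv_rel_countP (vfac : PySem.Dict Int (PySem.Set Int)) {nids : List (List Int)}
    {groups : List (PySem.Set Int)} (hR : List.Forall₂ (pvRel vfac) nids groups) (v : Int) :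
    nids.countP (fun f => decide (v ∈ f)) = groups.countP (fun g => pvTch vfac g v) := by
  induction hR with
  | nil => rfl
  | @cons f g nids' groups' hfg htl ih =>
    simp only [List.countP_cons, ih]
    congr 1
    by_cases h : v ∈ f
    · simp [h, (hfg v).mp h]
    · have hg : pvTch vfac g v = false := by
        cases ht : pvTch vfac g v
        · rfl
        · exact absurd ((hfg v).mpr ht) h
      simp [h, hg]

theorem pv_rel_filter (vfac : PySem.Dict Int (PySem.Set Int)) {nids : List (List Int)}
    {groups : List (PySem.Set Int)} (hR : List.Forall₂ (pvRel vfac) nids groups) (b : Int) :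
    List.Forall₂ (pvRel vfac) (nids.filter (fun f => decide (b ∈ f)))
      (groups.filter (fun g => pvTch vfac g b)) := by
  induction hR with
  | nil => simp
  | @cons f g nids' groups' hfg htl ih =>
    simp only [List.filter_cons]
    by_cases h : b ∈ f
    · simpa [h, (hfg b).mp h] using List.Forall₂.cons hfg ih
    · have hg : pvTch vfac g b = false := by
        cases ht : pvTch vfac g b
        · rfl
        · exact absurd ((hfg b).mpr ht) h
      simpa [h, hg] using ih

theorem pv_rel_filter_not (vfac : PySem.Dict Int (PySem.Set Int)) {nids : List (List Int)}
    {groups : List (PySem.Set Int)} (hR : List.Forall₂ (pvRel vfac) nids groups) (b : Int) :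
    List.Forall₂ (pvRel vfac) (nids.filter (fun f => decide (¬ b ∈ f)))
      (groups.filter (fun g => PySem.Set.isdisjoint (vfac.getD b PySem.Set.empty) g)) := by
  induction hR with
  | nil => simp
  | @cons f g nids' groups' hfg htl ih =>
    simp only [List.filter_cons]
    by_cases h : b ∈ f
    · have h2 : pvTch vfac g b = true := (hfg b).mp h
      have h3 : PySem.Set.isdisjoint (vfac.getD b PySem.Set.empty) g = false := by
        simpa [pvTch] using h2
      rw [if_neg (by simp [h]), if_neg (by simp only [h3]; simp)]
      exact ih
    · have h2 : pvTch vfac g b = false := by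
        cases ht : pvTch vfac g b
        · rfl
        · exact absurd ((hfg b).mpr ht) h
      have h3 : PySem.Set.isdisjoint (vfac.getD b PySem.Set.empty) g = true := by
        simpa [pvTch] using h2
      rw [if_pos (by simp [h]), if_pos (by simp only [h3])]
      exact List.Forall₂.cons hfg ih

-- membership in A's dedup-union accumulator
theorem pv_mem_dedup_union (t : List Int) (a : List Int) (v : Int) :
    v ∈ t.foldl (fun ni k => if k ∈ ni then ni else ni ++ [k]) a ↔ v ∈ a ∨ v ∈ t := by
  induction t generalizing a with
  | nil => simp
  | cons k t ih =>
    simp only [List.foldl_cons, List.mem_cons]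
    by_cases h : k ∈ a
    · rw [if_pos h, ih]
      constructor
      · rintro (h1 | h1) <;> tauto
      · rintro (h1 | rfl | h1) <;> tauto
    · rw [if_neg h, ih]
      simp only [List.mem_append, List.mem_singleton]
      tauto

theorem pv_mem_mergeA (ts : List (List Int)) (a : List Int) (v : Int) :
    v ∈ ts.foldl (fun acc t => t.foldl (fun ni k => if k ∈ ni then ni else ni ++ [k]) acc) a
      ↔ v ∈ a ∨ ∃ t ∈ ts, v ∈ t := by
  induction ts generalizing a with
  | nil => simp
  | cons t ts ih =>
    simp only [List.foldl_cons]
    rw [ih]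
    simp [pv_mem_dedup_union]
    tauto

-- what 'v touches g' means: some factor index of v lies in g
theorem pv_tch_iff (vfac : PySem.Dict Int (PySem.Set Int)) (g : PySem.Set Int) (v : Int) :
    pvTch vfac g v = true ↔ ∃ x ∈ vfac.getD v PySem.Set.empty, x ∈ g := by
  constructor
  · intro h
    by_contra hc
    rw [not_exists] at hc
    simp only [not_and] at hc
    have hd : PySem.Set.isdisjoint (vfac.getD v PySem.Set.empty) g = true :=
      (PySem.Set.isdisjoint_iff _ _).mpr hc
    simp only [pvTch, hd, Bool.not_true] at h
    exact absurd h Bool.false_ne_true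
  · rintro ⟨x, hx, hg⟩
    cases ht : pvTch vfac g v
    · exfalso
      simp only [pvTch, Bool.not_eq_false'] at ht
      exact (PySem.Set.isdisjoint_iff _ _).mp ht x hx hg
    · rfl

theorem pv_mem_foldl_union (gs : List (PySem.Set Int)) (a : PySem.Set Int) (x : Int) :
    x ∈ gs.foldl PySem.Set.union a ↔ x ∈ a ∨ ∃ g ∈ gs, x ∈ g := by
  induction gs generalizing a with
  | nil => simp
  | cons g gs ih =>
    simp only [List.foldl_cons]
    rw [ih]
    simp only [PySem.Set.mem_union, List.mem_cons]
    constructor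
    · rintro ((h1 | h1) | ⟨g', hg', h1⟩)
      · exact Or.inl h1
      · exact Or.inr ⟨g, Or.inl rfl, h1⟩
      · exact Or.inr ⟨g', Or.inr hg', h1⟩
    · rintro (h1 | ⟨g', (rfl | hg'), h1⟩)
      · exact Or.inl (Or.inl h1)
      · exact Or.inl (Or.inr h1)
      · exact Or.inr ⟨g', hg', h1⟩

theorem pv_tch_foldl_union (vfac : PySem.Dict Int (PySem.Set Int)) (gs : List (PySem.Set Int))
    (v : Int) :
    pvTch vfac (gs.foldl PySem.Set.union PySem.Set.empty) v = true ↔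
      ∃ g ∈ gs, pvTch vfac g v = true := by
  simp only [pv_tch_iff, pv_mem_foldl_union]
  constructor
  · rintro ⟨x, hx, (h1 | ⟨g, hg, h1⟩)⟩
    · exact absurd h1 (by simp [PySem.Set.empty])
    · exact ⟨g, hg, x, hx, h1⟩
  · rintro ⟨g, hg, x, hx, h1⟩
    exact ⟨x, hx, Or.inr ⟨g, hg, h1⟩⟩

-- existence transfer along the invariant
theorem pv_rel_exists (vfac : PySem.Dict Int (PySem.Set Int)) {nids : List (List Int)}
    {groups : List (PySem.Set Int)} (hR : List.Forall₂ (pvRel vfac) nids groups) (v : Int) :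
    (∃ f ∈ nids, v ∈ f) ↔ ∃ g ∈ groups, pvTch vfac g v = true := by
  induction hR with
  | nil => simp
  | cons hfg _ ih =>
    simp only [List.mem_cons]
    constructor
    · rintro ⟨f, (rfl | hf), hv⟩
      · exact ⟨_, Or.inl rfl, (hfg v).mp hv⟩
      · obtain ⟨g, hg, ht⟩ := ih.mp ⟨f, hf, hv⟩
        exact ⟨g, Or.inr hg, ht⟩
    · rintro ⟨g, (rfl | hg), ht⟩
      · exact ⟨_, Or.inl rfl, (hfg v).mpr ht⟩
      · obtain ⟨f, hf, hv⟩ := ih.mpr ⟨g, hg, ht⟩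
        exact ⟨f, Or.inr hf, hv⟩

-- ---- the per-round equivalence ----
theorem pv_step_rel (vfac : PySem.Dict Int (PySem.Set Int)) (r : List Int)
    (nids : List (List Int)) (groups : List (PySem.Set Int)) (hr : r ≠ [])
    (hR : List.Forall₂ (pvRel vfac) nids groups) :
    ∃ best,
      (pvStepA r nids).1 = best ∧
      ((pvSelB vfac groups r).getD (-1, 0)).1 = best ∧
      (pvStepA r nids).2.1 = (PySem.List.remove? r best).getD r ∧
      List.Forall₂ (pvRel vfac) (pvStepA r nids).2.2
        ((groups.foldl
            (fun (st : PySem.Set Int × List (PySem.Set Int)) g =>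
              if !(PySem.Set.isdisjoint (vfac.getD best PySem.Set.empty) g)
              then (PySem.Set.union st.1 g, st.2) else (st.1, st.2 ++ [g]))
            (PySem.Set.empty, [])).2
          ++ [(groups.foldl
            (fun (st : PySem.Set Int × List (PySem.Set Int)) g =>
              if !(PySem.Set.isdisjoint (vfac.getD best PySem.Set.empty) g)
              then (PySem.Set.union st.1 g, st.2) else (st.1, st.2 ++ [g]))
            (PySem.Set.empty, [])).1]) := by
  -- the two counts agree
  have hcnt : (fun v => (pvInnerA v nids).1) = pvCntB vfac groups := by
    funext v
    rw [pvInnerA_fst, pvCntB_eq_countP, pv_rel_countP vfac hR]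
  obtain ⟨m, hm⟩ : ∃ m, PySem.List.min? r (fun v => (pvInnerA v nids).1) = some m := by
    cases h : PySem.List.min? r (fun v => (pvInnerA v nids).1) with
    | none => exact absurd ((PySem.List.min?_eq_none_iff r _).mp h) hr
    | some m => exact ⟨m, rfl⟩
  have hmB : PySem.List.min? r (pvCntB vfac groups) = some m := hcnt ▸ hm
  refine ⟨m, ?_, ?_, ?_, ?_⟩
  · simp only [pvStepA, pv_select_spec, hm, pvH]
  · simp only [pv_selB_spec, hmB, pvHB, Option.getD_some]
  · simp only [pvStepA, pv_select_spec, hm, pvH]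
  · -- A's next factor list = filter-out ++ [dedup union]; B's = filter-keep ++ [set union]
    have hsplitA :
        (List.filter (fun f => decide (m ∈ f)) nids).foldl
          (fun (st : List Int × List (List Int)) t =>
            (t.foldl (fun ni k => if k ∈ ni then ni else ni ++ [k]) st.1,
             (PySem.List.remove? st.2 t).getD st.2)) (([] : List Int), nids)
        = ((List.filter (fun f => decide (m ∈ f)) nids).foldl
             (fun a t => t.foldl (fun ni k => if k ∈ ni then ni else ni ++ [k]) a) [],
           (List.filter (fun f => decide (m ∈ f)) nids).foldl
             (fun l t => (PySem.List.remove? l t).getD l) nids) :=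
      PySem.List.foldl_prod_mk
        (f := fun a t => t.foldl (fun ni k => if k ∈ ni then ni else ni ++ [k]) a)
        (g := fun l t => (PySem.List.remove? l t).getD l)
        (l := List.filter (fun f => decide (m ∈ f)) nids) (a := []) (b := nids)
    have hA2 : (pvStepA r nids).2.2
        = nids.filter (fun f => decide (¬ m ∈ f))
          ++ [(nids.filter (fun f => decide (m ∈ f))).foldl
                (fun a t => t.foldl (fun ni k => if k ∈ ni then ni else ni ++ [k]) a) []] := by
      simp only [pvStepA, pv_select_spec, hm, pvH, pvInnerA_t]
      rw [hsplitA, pv_remove_filter (p := fun f => m ∈ f)]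
    have hB2 := pv_mergeB_split (vfac.getD m PySem.Set.empty) groups PySem.Set.empty []
    rw [hA2, hB2]
    simp only [List.nil_append]
    refine List.rel_append ?_ (List.Forall₂.cons ?_ List.Forall₂.nil)
    · exact pv_rel_filter_not vfac hR m
    · -- the merged factor and the merged group have the same members
      intro v
      rw [pv_mem_mergeA]
      have hfil : (groups.filter (fun g => !(PySem.Set.isdisjoint (vfac.getD m PySem.Set.empty) g)))
          = groups.filter (fun g => pvTch vfac g m) := rfl
      rw [hfil, pv_tch_foldl_union]
      simp only [List.not_mem_nil, false_or]
      exact pv_rel_exists vfac (pv_rel_filter vfac hR m) v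

-- ---- the loop equivalence ----
theorem pv_loop_eq (vfac : PySem.Dict Int (PySem.Set Int)) (fuel : Nat) (r : List Int)
    (nids : List (List Int)) (groups : List (PySem.Set Int)) (o : List Int)
    (hR : List.Forall₂ (pvRel vfac) nids groups) :
    pvLoopA fuel r nids o = pvLoopB vfac fuel r groups o := by
  induction fuel generalizing r nids groups o with
  | zero => rfl
  | succ fuel ih =>
    cases r with
    | nil => rfl
    | cons x xs =>
      obtain ⟨best, hA, hB, hrem, hrel⟩ := pv_step_rel vfac (x :: xs) nids groups (by simp) hR
      simp only [pvLoopA, pvLoopB, List.isEmpty_cons, Bool.false_eq_true, if_false]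
      rw [hA, hB, ← hrem]
      exact ih _ _ _ _ hrel

-- ---- the initial invariant ----
theorem pv_varfac_inner (j : Int) (f : List Int) (d : PySem.Dict Int (PySem.Set Int)) (x v : Int) :
    x ∈ (f.foldl (fun d v => d.insert v ((d.getD v PySem.Set.empty).add j)) d).getD v PySem.Set.empty
      ↔ x ∈ d.getD v PySem.Set.empty ∨ (x = j ∧ v ∈ f) := by
  induction f generalizing d with
  | nil => simp
  | cons w f ih =>
    simp only [List.foldl_cons]
    rw [ih, PySem.Dict.getD_insert]
    by_cases h : v = w
    · subst h
      simp [PySem.Set.mem_add]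
      tauto
    · simp only [h, if_false]
      simp only [List.mem_cons, h, false_or]

theorem pv_varfac_mem (pairs : List (Int × List Int)) (d : PySem.Dict Int (PySem.Set Int)) (x v : Int) :
    x ∈ (pairs.foldl
          (fun d jf => jf.2.foldl (fun d v => d.insert v ((d.getD v PySem.Set.empty).add jf.1)) d)
          d).getD v PySem.Set.empty
      ↔ x ∈ d.getD v PySem.Set.empty ∨ ∃ jf ∈ pairs, x = jf.1 ∧ v ∈ jf.2 := by
  induction pairs generalizing d with
  | nil => simp
  | cons jf pairs ih =>
    simp only [List.foldl_cons]
    rw [ih, pv_varfac_inner]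
    simp
    tauto

theorem pv_init_rel (indices : List (List Int)) :
    List.Forall₂ (pvRel (pvVarfac indices)) indices
      ((PySem.List.pyRange 0 (PySem.List.len indices) 1).map (fun j => PySem.Set.ofList [j])) := by
  have hlen : PySem.List.len indices = ((indices.length : Nat) : Int) := by
    simp [PySem.List.len_eq]
  rw [hlen, PySem.List.pyRange_zero_natCast, List.map_map]
  rw [List.forall₂_iff_get]
  refine ⟨by simp, ?_⟩
  intro i h1 h2
  simp only [List.get_eq_getElem, List.getElem_map, List.getElem_range, Function.comp_apply]
  intro v
  rw [pv_tch_iff]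
  have hmem : ∀ x : Int, x ∈ (pvVarfac indices).getD v PySem.Set.empty ↔
      ∃ k, ∃ _ : k < indices.length, x = (k : Int) ∧ v ∈ indices[k] := by
    intro x
    unfold pvVarfac
    rw [pv_varfac_mem]
    constructor
    · rintro (hx | ⟨jf, hjf, hxj, hv⟩)
      · exact absurd hx (by simp [PySem.Dict.empty, PySem.Dict.getD, PySem.Dict.get?, PySem.Set.empty])
      · obtain ⟨k, hk, rfl⟩ := (PySem.List.mem_enumerate_iff _ _ _).mp hjf
        exact ⟨k, hk, by simpa using hxj, hv⟩
    · rintro ⟨k, hk, rfl, hv⟩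
      refine Or.inr ⟨((k : Int), indices[k]), ?_, rfl, hv⟩
      exact (PySem.List.mem_enumerate_iff _ _ _).mpr ⟨k, hk, by simp⟩
  constructor
  · intro hv
    refine ⟨(i : Int), ?_, by simp [PySem.Set.mem_ofList]⟩
    exact (hmem _).mpr ⟨i, h1, rfl, hv⟩
  · rintro ⟨x, hx, hxg⟩
    have hxi : x = (i : Int) := by simpa [PySem.Set.mem_ofList] using hxg
    obtain ⟨k, hk, hki, hv⟩ := (hmem x).mp hx
    have : k = i := by
      have := hki ▸ hxi
      exact_mod_cast this
    exact this ▸ hv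

-- ===== VERDICT (by name: the statement is the Claim_ definition above) =====
theorem compute_best_order_spec : Claim_equal_compute_best_order := by
  intro indices max _
  unfold Spec_compute_best_order compute_best_order compute_best_order_alt
  exact pv_loop_eq _ _ _ _ _ _ (by simpa using pv_init_rel indices)
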